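-- pv_equiv track=rewrite | github.com/taroyabuki/classic-basic | src/z80_basic/osi_basic.py | _filter_file_run_output
-- ===== SOURCE A (Python) =====
-- def _filter_file_run_output(text: str) -> str:
--     lines = text.replace("\r\n", "\n").replace("\r", "\n").split("\n")
--     run_index = None
--     for index, line in enumerate(lines):
--         if line.strip() == "RUN":
--             run_index = index
--     if run_index is None:
--         return text
--
--     output_lines = lines[run_index + 1 :]
--     output_lines = [line.rstrip() for line in output_lines if line.strip()]
--     if output_lines and output_lines[-1].strip() == "OK":
--         output_lines.pop()
--     if not output_lines:
--         return ""
--     return "\n".join(output_lines) + "\n"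
-- ===== SOURCE B (Python) =====
-- def _filter_file_run_output(text: str) -> str:
--     seen_run = False
--     out = []
--     for line in text.replace("\r\n", "\n").replace("\r", "\n").split("\n"):
--         if line.strip() == "RUN":
--             seen_run = True
--             out = []
--         elif line.strip():
--             out.append(line.rstrip())
--     if not seen_run:
--         return text
--     if out and out[-1].strip() == "OK":
--         out.pop()
--     if not out:
--         return ""
--     return "\n".join(out) + "\n"
-- ===== Notes on version B (the rewrite author's own statement) =====
-- stated objective: alternative
-- what changed: Replaces A's two-stage 'scan for last RUN index, then slice and filter the tail' with a single forward pass keeping a seen_run flag and an accumulator that is reset at every RUN marker.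
import Mathlib
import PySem

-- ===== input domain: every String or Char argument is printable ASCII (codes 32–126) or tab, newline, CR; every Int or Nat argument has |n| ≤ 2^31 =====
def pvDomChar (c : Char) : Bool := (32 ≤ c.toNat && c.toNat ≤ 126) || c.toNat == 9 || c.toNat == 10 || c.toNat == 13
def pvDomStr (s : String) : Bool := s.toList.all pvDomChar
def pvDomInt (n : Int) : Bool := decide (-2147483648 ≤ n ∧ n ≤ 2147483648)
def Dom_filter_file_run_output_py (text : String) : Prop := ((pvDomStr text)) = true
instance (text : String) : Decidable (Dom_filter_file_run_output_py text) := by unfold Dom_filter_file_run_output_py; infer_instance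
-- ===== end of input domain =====

-- B replaces A's two-stage "find the index of the last RUN line, then slice and filter the
-- tail" with a single forward pass whose accumulator is reset at every RUN marker (objective:
-- alternative decomposition, same cost).

-- ===== PORT A =====
-- the 'for index, line in enumerate(lines)' loop recording the last index whose strip is "RUN"
def pvFindRunIdx : List String → Nat → Option Nat → Option Nat
  | [], _, r => r
  | l :: ls, i, r => pvFindRunIdx ls (i + 1) (if PySem.Str.strip l == "RUN" then some i else r)

def filter_file_run_output_py (text : String) : String :=
  let lines := (PySem.Str.split?
    (PySem.Str.replace (PySem.Str.replace text "\r\n" "\n") "\r" "\n") "\n").getD []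
    -- split? is some here since the separator "\n" is nonempty; .getD [] unwraps it
  match pvFindRunIdx lines 0 none with
  | none => text
  | some run_index =>
    -- lines[run_index + 1:] with a nonnegative index is List.drop (exact here)
    let output_lines := lines.drop (run_index + 1)
    -- [line.rstrip() for line in output_lines if line.strip()]
    let output_lines := output_lines.filterMap
      (fun l => if PySem.Str.strip l ≠ "" then some (PySem.Str.rstrip l) else none)
    -- if output_lines and output_lines[-1].strip() == "OK": output_lines.pop()
    let output_lines := match output_lines.getLast? with
      | some last => if PySem.Str.strip last == "OK" then output_lines.dropLast else output_lines
      | none => output_lines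
    if output_lines = [] then "" else PySem.Str.join "\n" output_lines ++ "\n"

-- ===== PORT B =====
-- the single pass: (seen_run, out), out reset at every RUN line
def pvRunScan : List String → Bool → List String → Bool × List String
  | [], seen, out => (seen, out)
  | l :: ls, seen, out =>
    if PySem.Str.strip l == "RUN" then pvRunScan ls true []
    else if PySem.Str.strip l ≠ "" then pvRunScan ls seen (out ++ [PySem.Str.rstrip l])
    else pvRunScan ls seen out

def filter_file_run_output_py_alt (text : String) : String :=
  let lines := (PySem.Str.split?
    (PySem.Str.replace (PySem.Str.replace text "\r\n" "\n") "\r" "\n") "\n").getD []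
    -- split? is some here since the separator "\n" is nonempty; .getD [] unwraps it
  let res := pvRunScan lines false []
  if !res.1 then text
  else
    let out := match res.2.getLast? with
      | some last => if PySem.Str.strip last == "OK" then res.2.dropLast else res.2
      | none => res.2
    if out = [] then "" else PySem.Str.join "\n" out ++ "\n"

-- ===== PRECONDITION & SPEC =====
def Spec_filter_file_run_output_py (text : String) (out : String) : Prop := out = filter_file_run_output_py_alt text
instance (text : String) (out : String) : Decidable (Spec_filter_file_run_output_py text out) := by unfold Spec_filter_file_run_output_py; infer_instance

-- ===== CLAIM (what is proved, stated in full; the proofs are below) =====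
def Claim_equal_filter_file_run_output_py : Prop := ∀ (text : String), Dom_filter_file_run_output_py text → Spec_filter_file_run_output_py text (filter_file_run_output_py text)

-- ===== LEMMAS AND PROOFS =====

-- the kept (non-blank, rstripped) lines of a list
def pvKeep (ls : List String) : List String :=
  ls.filterMap (fun l => if PySem.Str.strip l ≠ "" then some (PySem.Str.rstrip l) else none)

-- the suffix after the LAST line stripping to "RUN", if any
def pvAfter : List String → Option (List String)
  | [] => none
  | l :: ls => match pvAfter ls with
    | some s => some s
    | none => if PySem.Str.strip l == "RUN" then some ls else none

-- the index of the last line stripping to "RUN", if any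
def pvLastIdx : List String → Option Nat
  | [] => none
  | l :: ls => match pvLastIdx ls with
    | some j => some (j + 1)
    | none => if PySem.Str.strip l == "RUN" then some 0 else none

theorem pvFindRunIdx_eq (ls : List String) : ∀ (i : Nat) (r : Option Nat),
    pvFindRunIdx ls i r = match pvLastIdx ls with
      | some j => some (i + j)
      | none => r := by
  induction ls with
  | nil => intro i r; rfl
  | cons l ls ih =>
    intro i r
    simp only [pvFindRunIdx, pvLastIdx, ih]
    cases h : pvLastIdx ls with
    | some j => simp [Nat.add_assoc, Nat.add_comm 1 j]
    | none => split_ifs <;> simp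

theorem pvAfter_eq (ls : List String) :
    pvAfter ls = (pvLastIdx ls).map (fun j => ls.drop (j + 1)) := by
  induction ls with
  | nil => rfl
  | cons l ls ih =>
    simp only [pvAfter, pvLastIdx, ih]
    cases h : pvLastIdx ls with
    | some j => simp
    | none => split_ifs <;> simp

theorem pvRunScan_eq (ls : List String) : ∀ (seen : Bool) (out : List String),
    pvRunScan ls seen out = match pvAfter ls with
      | some s => (true, pvKeep s)
      | none => (seen, out ++ pvKeep ls) := by
  induction ls with
  | nil => intro seen out; simp [pvRunScan, pvAfter, pvKeep]
  | cons l ls ih =>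
    intro seen out
    simp only [pvRunScan]
    by_cases hrun : PySem.Str.strip l == "RUN"
    · rw [if_pos hrun, ih]
      cases h : pvAfter ls with
      | some s => simp [pvAfter, h]
      | none => simp [pvAfter, h, hrun]
    · rw [if_neg hrun]
      have hA : pvAfter (l :: ls) = pvAfter ls := by
        simp only [pvAfter]
        cases h : pvAfter ls with
        | some s => rfl
        | none => simp [hrun]
      by_cases hne : PySem.Str.strip l ≠ ""
      · rw [if_pos hne, ih, hA]
        cases h : pvAfter ls with
        | some s => rfl
        | none => simp [pvKeep, hne]
      · rw [if_neg hne, ih, hA]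
        cases h : pvAfter ls with
        | some s => rfl
        | none => simp [pvKeep, hne]

-- ===== VERDICT (by name: the statement is the Claim_ definition above) =====
theorem filter_file_run_output_py_spec : Claim_equal_filter_file_run_output_py := by
  intro text _
  unfold Spec_filter_file_run_output_py filter_file_run_output_py filter_file_run_output_py_alt
  generalize (PySem.Str.split?
      (PySem.Str.replace (PySem.Str.replace text "\r\n" "\n") "\r" "\n") "\n").getD [] = lines
  simp only []
  rw [pvFindRunIdx_eq, pvRunScan_eq, pvAfter_eq]
  cases h : pvLastIdx lines with
  | none => rfl
  | some j => simp only [Option.map_some, pvKeep, Nat.zero_add]; rfl
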